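-- pv_equiv track=rewrite | github.com/ttoino/advent-of-code | 2016/day01.py | part2
-- ===== SOURCE A (Python) =====
-- dir_map = [(0, 1), (1, 0), (0, -1), (-1, 0)]
--
-- def part2(inp: list[tuple[str, int]]) -> int:
--     direction = 0
--     x, y = 0, 0
--     visited = {(x, y)}
--
--     for d, amount in inp:
--         direction += d == "R"
--         direction -= d == "L"
--         dx, dy = dir_map[direction % 4]
--
--         for _ in range(amount):
--             x, y = x + dx, y + dy
--
--             if (x, y) in visited:
--                 return abs(x) + abs(y)
--
--             visited.add((x, y))
--
--     return -1
-- ===== SOURCE B (Python) =====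
-- dir_map = [(0, 1), (1, 0), (0, -1), (-1, 0)]
--
-- def first_hit(x, y, dx, dy, n, x1, y1, x2, y2):
--     # earliest t in [1, n] with (x + t*dx, y + t*dy) inside the segment's
--     # bounding box (segments are axis-aligned, so box membership = on-segment)
--     lox, hix = min(x1, x2), max(x1, x2)
--     loy, hiy = min(y1, y2), max(y1, y2)
--     if dx != 0:
--         if not (loy <= y <= hiy):
--             return None
--         tlo, thi = (lox - x, hix - x) if dx == 1 else (x - hix, x - lox)
--     else:
--         if not (lox <= x <= hix):
--             return None
--         tlo, thi = (loy - y, hiy - y) if dy == 1 else (y - hiy, y - loy)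
--     t = max(1, tlo)
--     return t if t <= min(n, thi) else None
--
-- def part2(inp: list[tuple[str, int]]) -> int:
--     direction = 0
--     x, y = 0, 0
--     segs = [((0, 0), (0, 0))]  # visited points = union of these segments
--
--     for d, amount in inp:
--         direction += d == "R"
--         direction -= d == "L"
--         dx, dy = dir_map[direction % 4]
--
--         best = None
--         for (x1, y1), (x2, y2) in segs:
--             t = first_hit(x, y, dx, dy, amount, x1, y1, x2, y2)
--             if t is not None and (best is None or t < best):
--                 best = t
--         if best is not None:
--             return abs(x + best * dx) + abs(y + best * dy)
--         if amount > 0: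
--             segs.append(((x, y), (x + amount * dx, y + amount * dy)))
--             x, y = x + amount * dx, y + amount * dy
--
--     return -1
-- ===== Notes on version B (the rewrite author's own statement) =====
-- stated objective: alternative
-- what changed: B replaces A's step-by-step walk that inserts every visited grid point into a set by segment intersection: it keeps one axis-aligned segment per move and, for each new move, computes in O(1) per previous segment the earliest step parameter at which the move crosses it, taking the minimum; B's cost depends on the number of moves rather than on the step amounts.
import Mathlib
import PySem

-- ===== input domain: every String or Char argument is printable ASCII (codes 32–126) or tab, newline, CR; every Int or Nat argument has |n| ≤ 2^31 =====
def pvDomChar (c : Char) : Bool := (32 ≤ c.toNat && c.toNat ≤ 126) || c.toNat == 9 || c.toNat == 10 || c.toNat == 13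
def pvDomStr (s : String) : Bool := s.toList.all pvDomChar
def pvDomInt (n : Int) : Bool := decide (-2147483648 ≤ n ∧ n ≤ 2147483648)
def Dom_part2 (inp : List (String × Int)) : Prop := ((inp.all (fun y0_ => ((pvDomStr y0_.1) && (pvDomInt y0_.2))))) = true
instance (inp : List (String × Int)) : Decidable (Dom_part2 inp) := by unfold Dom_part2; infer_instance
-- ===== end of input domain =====

-- B replaces A's step-by-step walk with a visited set by segment intersection
-- over the moves: the earliest crossing parameter per previous segment,
-- minimised; its cost depends on the number of moves, not on the amounts.

-- ===== PORT A =====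
def dirMap : List (Int × Int) := [(0, 1), (1, 0), (0, -1), (-1, 0)]

-- inner 'for _ in range(amount)' loop: range(amount) iterates max(amount,0) times,
-- ported as structural recursion on amount.toNat; .inl = early return
-- the Python set 'visited' is internal state only; it is ported as Std.HashSet
-- (a hash set of points, like Python's set; only membership and insert are used)
def innerA (dx dy : Int) : Nat → Int → Int → Std.HashSet (Int × Int) →
    Sum Int (Int × Int × Std.HashSet (Int × Int))
  | 0, x, y, v => .inr (x, y, v)
  | n+1, x, y, v =>
    let x' := x + dx
    let y' := y + dy
    if (x', y') ∈ v then .inl (|x'| + |y'|)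
    else innerA dx dy n x' y' (v.insert (x', y'))

def stepA (st : Sum Int (Int × Int × Int × Std.HashSet (Int × Int))) (m : String × Int) :
    Sum Int (Int × Int × Int × Std.HashSet (Int × Int)) :=
  match st with
  | .inl r => .inl r
  | .inr (direction, x, y, v) =>
    let direction := direction + (if m.1 == "R" then 1 else 0) - (if m.1 == "L" then 1 else 0)
    -- dir_map[direction % 4] never raises (index in [0,4)): getD is exact here
    let p := (PySem.List.pyGet? dirMap (PySem.Int.mod direction 4)).getD (0, 0)
    match innerA p.1 p.2 m.2.toNat x y v with
    | .inl r => .inl r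
    | .inr (x, y, v) => .inr (direction, x, y, v)

def part2 (inp : List (String × Int)) : Int :=
  match inp.foldl stepA (.inr (0, 0, 0, (∅ : Std.HashSet (Int × Int)).insert (0, 0))) with
  | .inl r => r
  | .inr _ => -1

-- ===== PORT B =====
-- a segment is (start point, end point), inclusive, axis-aligned
def firstHit (x y dx dy n x1 y1 x2 y2 : Int) : Option Int :=
  let lox := min x1 x2
  let hix := max x1 x2
  let loy := min y1 y2
  let hiy := max y1 y2
  if dx ≠ 0 then
    if ¬ (loy ≤ y ∧ y ≤ hiy) then none
    else
      let tb := if dx = 1 then (lox - x, hix - x) else (x - hix, x - lox)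
      let t := max 1 tb.1
      if t ≤ min n tb.2 then some t else none
  else
    if ¬ (lox ≤ x ∧ x ≤ hix) then none
    else
      let tb := if dy = 1 then (loy - y, hiy - y) else (y - hiy, y - loy)
      let t := max 1 tb.1
      if t ≤ min n tb.2 then some t else none

-- the 'best' accumulator loop of B, over the list of segments
def firstHitFold (x y dx dy n : Int) :
    List ((Int × Int) × (Int × Int)) → Option Int → Option Int
  | [], best => best
  | s :: l, best =>
    firstHitFold x y dx dy n l
      (match firstHit x y dx dy n s.1.1 s.1.2 s.2.1 s.2.2 with
       | none => best
       | some t =>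
         match best with
         | none => some t
         | some b => if t < b then some t else best)

def stepB (st : Sum Int (Int × Int × Int × List ((Int × Int) × (Int × Int))))
    (m : String × Int) :
    Sum Int (Int × Int × Int × List ((Int × Int) × (Int × Int))) :=
  match st with
  | .inl r => .inl r
  | .inr (direction, x, y, segs) =>
    let direction := direction + (if m.1 == "R" then 1 else 0) - (if m.1 == "L" then 1 else 0)
    let p := (PySem.List.pyGet? dirMap (PySem.Int.mod direction 4)).getD (0, 0)
    match firstHitFold x y p.1 p.2 m.2 segs none with
    | some t => .inl (|x + t * p.1| + |y + t * p.2|)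
    | none =>
      if m.2 > 0 then
        .inr (direction, x + m.2 * p.1, y + m.2 * p.2,
          segs ++ [((x, y), (x + m.2 * p.1, y + m.2 * p.2))])
      else .inr (direction, x, y, segs)

def part2_alt (inp : List (String × Int)) : Int :=
  match inp.foldl stepB (.inr (0, 0, 0, [(((0:Int), (0:Int)), ((0:Int), (0:Int)))])) with
  | .inl r => r
  | .inr _ => -1

-- ===== PRECONDITION & SPEC =====
def Spec_part2 (inp : List (String × Int)) (out : Int) : Prop := out = part2_alt inp
instance (inp : List (String × Int)) (out : Int) : Decidable (Spec_part2 inp out) := by unfold Spec_part2; infer_instance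

-- ===== CLAIM (what is proved, stated in full; the proofs are below) =====
def Claim_equal_part2 : Prop := ∀ (inp : List (String × Int)), Dom_part2 inp → Spec_part2 inp (part2 inp)

-- ===== LEMMAS AND PROOFS =====

-- a point is on an (axis-aligned) segment iff it is in its bounding box
def inBox (p : Int × Int) (s : (Int × Int) × (Int × Int)) : Prop :=
  min s.1.1 s.2.1 ≤ p.1 ∧ p.1 ≤ max s.1.1 s.2.1 ∧
  min s.1.2 s.2.2 ≤ p.2 ∧ p.2 ≤ max s.1.2 s.2.2

-- the direction lookup always yields a member of dirMap
theorem dir_mem (d : Int) :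
    (PySem.List.pyGet? dirMap (PySem.Int.mod d 4)).getD (0, 0) ∈ dirMap := by
  rw [PySem.Int.mod_eq_emod_of_pos (by omega : (0:Int) < 4)]
  have h0 : 0 ≤ d % 4 := Int.emod_nonneg d (by omega)
  have h1 : d % 4 < 4 := Int.emod_lt_of_pos d (by omega)
  interval_cases h : (d % 4) <;> decide

theorem firstHit_some {dx dy : Int} (hu : (dx, dy) ∈ dirMap)
    (x y n x1 y1 x2 y2 t : Int)
    (h : firstHit x y dx dy n x1 y1 x2 y2 = some t) :
    1 ≤ t ∧ t ≤ n ∧ inBox (x + t * dx, y + t * dy) ((x1, y1), (x2, y2)) ∧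
      ∀ u, 1 ≤ u → u < t → ¬ inBox (x + u * dx, y + u * dy) ((x1, y1), (x2, y2)) := by
  unfold firstHit at h
  unfold inBox
  fin_cases hu <;> simp_all <;>
    refine ⟨by omega, by omega, by omega, by intros; omega⟩

theorem firstHit_none {dx dy : Int} (hu : (dx, dy) ∈ dirMap)
    (x y n x1 y1 x2 y2 : Int)
    (h : firstHit x y dx dy n x1 y1 x2 y2 = none) :
    ∀ t, 1 ≤ t → t ≤ n → ¬ inBox (x + t * dx, y + t * dy) ((x1, y1), (x2, y2)) := by
  unfold firstHit at h
  unfold inBox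
  fin_cases hu <;> simp_all <;> (intros; omega)

theorem mem_insert_pair (v : Std.HashSet (Int × Int)) (q p : Int × Int) :
    p ∈ v.insert q ↔ p ∈ v ∨ p = q := by
  simp [Std.HashSet.mem_insert]
  tauto

-- points of a move step are pairwise distinct along the move
theorem step_ne {dx dy : Int} (hu : (dx, dy) ∈ dirMap) (x y u : Int) (h1 : 1 ≤ u) :
    (x + (u + 1) * dx, y + (u + 1) * dy) ≠ (x + dx, y + dy) := by
  fin_cases hu <;> simp [Prod.ext_iff] <;> omega

-- the minimum-of-hits fold: none case
theorem foldmin_none (x y dx dy n : Int) :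
    ∀ (l : List ((Int × Int) × (Int × Int))) (acc : Option Int),
      firstHitFold x y dx dy n l acc = none →
      acc = none ∧ ∀ s ∈ l, firstHit x y dx dy n s.1.1 s.1.2 s.2.1 s.2.2 = none := by
  intro l
  induction l with
  | nil => intro acc h; exact ⟨h, by simp⟩
  | cons s l ih =>
    intro acc h
    rw [firstHitFold] at h
    have h2 := ih _ h
    rcases hg : firstHit x y dx dy n s.1.1 s.1.2 s.2.1 s.2.2 with _ | t
    · rw [hg] at h2
      exact ⟨h2.1, by
        intro a ha
        rcases List.mem_cons.1 ha with rfl | ha'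
        · exact hg
        · exact h2.2 a ha'⟩
    · exfalso
      rw [hg] at h2
      rcases acc with _ | b
      · simp at h2
      · simp only at h2
        split_ifs at h2 with hc <;> simp at h2

-- the minimum-of-hits fold: some case
theorem foldmin_some (x y dx dy n : Int) :
    ∀ (l : List ((Int × Int) × (Int × Int))) (acc : Option Int) (t : Int),
      firstHitFold x y dx dy n l acc = some t →
      (acc = some t ∨ ∃ s ∈ l, firstHit x y dx dy n s.1.1 s.1.2 s.2.1 s.2.2 = some t) ∧
      (∀ b, acc = some b → t ≤ b) ∧
      (∀ s ∈ l, ∀ b, firstHit x y dx dy n s.1.1 s.1.2 s.2.1 s.2.2 = some b → t ≤ b) := by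
  intro l
  induction l with
  | nil =>
    intro acc t h
    rw [firstHitFold] at h
    exact ⟨Or.inl h, fun b hb => by rw [h] at hb; injection hb with hb'; omega, by simp⟩
  | cons s l ih =>
    intro acc t h
    rw [firstHitFold] at h
    have h2 := ih _ _ h
    rcases hg : firstHit x y dx dy n s.1.1 s.1.2 s.2.1 s.2.2 with _ | u
    · rw [hg] at h2
      refine ⟨?_, h2.2.1, ?_⟩
      · rcases h2.1 with h3 | ⟨s', hs', hgs'⟩
        · exact Or.inl h3
        · exact Or.inr ⟨s', List.mem_cons_of_mem _ hs', hgs'⟩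
      · intro a ha b hb
        rcases List.mem_cons.1 ha with rfl | ha'
        · rw [hg] at hb; exact absurd hb (by simp)
        · exact h2.2.2 a ha' b hb
    · rw [hg] at h2
      rcases acc with _ | b0
      · simp only at h2
        have hub : t ≤ u := h2.2.1 u rfl
        refine ⟨?_, by simp, ?_⟩
        · rcases h2.1 with h3 | ⟨s', hs', hgs'⟩
          · exact Or.inr ⟨s, List.mem_cons_self, by rw [hg, ← h3]⟩
          · exact Or.inr ⟨s', List.mem_cons_of_mem _ hs', hgs'⟩
        · intro a ha b hb
          rcases List.mem_cons.1 ha with rfl | ha'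
          · rw [hg] at hb; injection hb with hb'; omega
          · exact h2.2.2 a ha' b hb
      · simp only at h2
        split_ifs at h2 with hcmp
        · have hub : t ≤ u := h2.2.1 u rfl
          refine ⟨?_, ?_, ?_⟩
          · rcases h2.1 with h3 | ⟨s', hs', hgs'⟩
            · exact Or.inr ⟨s, List.mem_cons_self, by rw [hg, ← h3]⟩
            · exact Or.inr ⟨s', List.mem_cons_of_mem _ hs', hgs'⟩
          · intro b hb; injection hb with hb'; omega
          · intro a ha b hb
            rcases List.mem_cons.1 ha with rfl | ha'
            · rw [hg] at hb; injection hb with hb'; omega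
            · exact h2.2.2 a ha' b hb
        · have hub : t ≤ b0 := h2.2.1 b0 rfl
          refine ⟨?_, ?_, ?_⟩
          · rcases h2.1 with h3 | ⟨s', hs', hgs'⟩
            · exact Or.inl (by rw [← h3])
            · exact Or.inr ⟨s', List.mem_cons_of_mem _ hs', hgs'⟩
          · intro b hb; injection hb with hb'; omega
          · intro a ha b hb
            rcases List.mem_cons.1 ha with rfl | ha'
            · rw [hg] at hb; injection hb with hb'; omega
            · exact h2.2.2 a ha' b hb

-- A's inner loop hits: it returns the distance of the FIRST revisited point
theorem innerA_hit {dx dy : Int} (hu : (dx, dy) ∈ dirMap) :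
    ∀ (n : Nat) (x y : Int) (v : Std.HashSet (Int × Int)) (t0 : Int),
      1 ≤ t0 → t0 ≤ (n : Int) → (x + t0 * dx, y + t0 * dy) ∈ v →
      (∀ u, 1 ≤ u → u < t0 → (x + u * dx, y + u * dy) ∉ v) →
      innerA dx dy n x y v = .inl (|x + t0 * dx| + |y + t0 * dy|) := by
  intro n
  induction n with
  | zero => intro x y v t0 h1 h2 _ _; simp at h2; omega
  | succ n ih =>
    intro x y v t0 h1 h2 hmem hmin
    by_cases ht : t0 = 1
    · subst ht
      simp only [one_mul] at hmem
      simp [innerA, hmem]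
    · have hne1 : (x + dx, y + dy) ∉ v := by
        have := hmin 1 le_rfl (by omega)
        simpa using this
      have heq : ∀ t : Int, (x + dx + t * dx, y + dy + t * dy) = (x + (t + 1) * dx, y + (t + 1) * dy) := by
        intro t; simp [Prod.ext_iff]; constructor <;> ring
      rw [innerA]
      simp only [if_neg hne1]
      have := ih (x + dx) (y + dy) (v.insert (x + dx, y + dy)) (t0 - 1)
        (by omega) (by push_cast at h2 ⊢; omega)
        (by rw [heq (t0 - 1)]
            simp only [sub_add_cancel]
            exact (mem_insert_pair _ _ _).2 (Or.inl hmem))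
        (by intro u hu1 hu2
            rw [heq u, mem_insert_pair]
            push_neg
            exact ⟨hmin (u + 1) (by omega) (by omega), step_ne hu x y u hu1⟩)
      rw [this, show x + dx + (t0 - 1) * dx = x + t0 * dx by ring,
        show y + dy + (t0 - 1) * dy = y + t0 * dy by ring]

-- A's inner loop misses: final position and the visited set it builds
theorem innerA_miss {dx dy : Int} (hu : (dx, dy) ∈ dirMap) :
    ∀ (n : Nat) (x y : Int) (v : Std.HashSet (Int × Int)),
      (∀ t, 1 ≤ t → t ≤ (n : Int) → (x + t * dx, y + t * dy) ∉ v) →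
      ∃ v', innerA dx dy n x y v = .inr (x + (n : Int) * dx, y + (n : Int) * dy, v') ∧
        ∀ p, p ∈ v' ↔ (p ∈ v ∨ ∃ t, 1 ≤ t ∧ t ≤ (n : Int) ∧ p = (x + t * dx, y + t * dy)) := by
  intro n
  induction n with
  | zero =>
    intro x y v _
    refine ⟨v, by simp [innerA], fun p => ?_⟩
    simp only [Nat.cast_zero]
    constructor
    · exact fun h => Or.inl h
    · rintro (h | ⟨t, ht1, ht2, _⟩)
      · exact h
      · exact absurd ht2 (by omega)
  | succ n ih =>
    intro x y v hmiss
    have hne1 : (x + dx, y + dy) ∉ v := by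
      have := hmiss 1 le_rfl (by push_cast; omega)
      simpa using this
    have heq : ∀ t : Int, (x + dx + t * dx, y + dy + t * dy) = (x + (t + 1) * dx, y + (t + 1) * dy) := by
      intro t; simp [Prod.ext_iff]; constructor <;> ring
    obtain ⟨v', he, hv⟩ := ih (x + dx) (y + dy) (v.insert (x + dx, y + dy))
      (by intro t ht1 ht2
          rw [heq t, mem_insert_pair]
          push_neg
          exact ⟨hmiss (t + 1) (by omega) (by push_cast; omega), step_ne hu x y t ht1⟩)
    refine ⟨v', ?_, ?_⟩
    · rw [innerA]
      simp only [if_neg hne1]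
      rw [he, show x + dx + (n : Int) * dx = x + ((n + 1 : Nat) : Int) * dx by push_cast; ring,
        show y + dy + (n : Int) * dy = y + ((n + 1 : Nat) : Int) * dy by push_cast; ring]
    · intro p
      rw [hv p, mem_insert_pair]
      constructor
      · rintro ((h | rfl) | ⟨t, ht1, ht2, rfl⟩)
        · exact Or.inl h
        · exact Or.inr ⟨1, by omega, by push_cast; omega, by simp⟩
        · exact Or.inr ⟨t + 1, by omega, by push_cast; omega,
            by rw [heq t]⟩
      · rintro (h | ⟨t, ht1, ht2, rfl⟩)
        · exact Or.inl (Or.inl h)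
        · by_cases ht : t = 1
          · subst ht; exact Or.inl (Or.inr (by simp))
          · exact Or.inr ⟨t - 1, by omega, by push_cast at ht2 ⊢; omega,
              by rw [heq (t - 1)]; simp⟩

-- the bounding box of one move's segment is exactly its set of step points
theorem inBox_seg {dx dy : Int} (hu : (dx, dy) ∈ dirMap) (x y n : Int) (hn : 0 < n)
    (p : Int × Int) :
    inBox p ((x, y), (x + n * dx, y + n * dy)) ↔
      ∃ t, 0 ≤ t ∧ t ≤ n ∧ p = (x + t * dx, y + t * dy) := by
  fin_cases hu
  · constructor
    · intro h
      simp [inBox] at h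
      exact ⟨p.2 - y, by omega, by omega, by simp [Prod.ext_iff]; omega⟩
    · rintro ⟨t, ht1, ht2, rfl⟩
      simp [inBox]; omega
  · constructor
    · intro h
      simp [inBox] at h
      exact ⟨p.1 - x, by omega, by omega, by simp [Prod.ext_iff]; omega⟩
    · rintro ⟨t, ht1, ht2, rfl⟩
      simp [inBox]; omega
  · constructor
    · intro h
      simp [inBox] at h
      exact ⟨y - p.2, by omega, by omega, by simp [Prod.ext_iff]; omega⟩
    · rintro ⟨t, ht1, ht2, rfl⟩
      simp [inBox]; omega
  · constructor
    · intro h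
      simp [inBox] at h
      exact ⟨x - p.1, by omega, by omega, by simp [Prod.ext_iff]; omega⟩
    · rintro ⟨t, ht1, ht2, rfl⟩
      simp [inBox]; omega

-- the coupling invariant between A's state and B's state
def InvSt : Sum Int (Int × Int × Int × Std.HashSet (Int × Int)) →
    Sum Int (Int × Int × Int × List ((Int × Int) × (Int × Int))) → Prop
  | .inl a, .inl b => a = b
  | .inr (d, x, y, v), .inr (d', x', y', segs) =>
      d = d' ∧ x = x' ∧ y = y' ∧ (x, y) ∈ v ∧ (∀ p, p ∈ v ↔ ∃ s ∈ segs, inBox p s)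
  | _, _ => False

theorem step_inv (sa : Sum Int (Int × Int × Int × Std.HashSet (Int × Int)))
    (sb : Sum Int (Int × Int × Int × List ((Int × Int) × (Int × Int))))
    (m : String × Int) (h : InvSt sa sb) : InvSt (stepA sa m) (stepB sb m) := by
  rcases sa with a | ⟨d, x, y, v⟩ <;> rcases sb with b | ⟨d', x', y', segs⟩
  · exact h
  · exact h.elim
  · exact h.elim
  · obtain ⟨rfl, rfl, rfl, hxy, hiff⟩ := h
    simp only [stepA, stepB]
    generalize (d + (if m.1 == "R" then (1:Int) else 0) - (if m.1 == "L" then 1 else 0)) = d2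
    generalize hp : (PySem.List.pyGet? dirMap (PySem.Int.mod d2 4)).getD ((0:Int), (0:Int)) = p
    have hu : (p.1, p.2) ∈ dirMap := by rw [Prod.mk.eta, ← hp]; exact dir_mem d2
    rcases hbest : firstHitFold x y p.1 p.2 m.2 segs none with _ | t
    · -- no crossing: A's inner loop runs to the end
      have hnone := (foldmin_none x y p.1 p.2 m.2 segs none hbest).2
      have hnovisit : ∀ t : Int, 1 ≤ t → t ≤ (m.2.toNat : Int) →
          (x + t * p.1, y + t * p.2) ∉ v := by
        intro t ht1 ht2 hmem
        obtain ⟨s, hs, hbox⟩ := (hiff _).1 hmem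
        have hn' := firstHit_none hu x y m.2 s.1.1 s.1.2 s.2.1 s.2.2 (hnone s hs)
          t ht1 (by omega)
        simp only [Prod.mk.eta] at hn'
        exact hn' hbox
      obtain ⟨v', he, hv⟩ := innerA_miss hu m.2.toNat x y v hnovisit
      rw [he]
      by_cases hn : m.2 > 0
      · rw [if_pos hn]
        have hcast : ((m.2.toNat : Nat) : Int) = m.2 := by omega
        refine ⟨rfl, by rw [hcast], by rw [hcast], ?_, ?_⟩
        · exact (hv _).2 (Or.inr ⟨(m.2.toNat : Int), by omega, le_refl _, rfl⟩)
        · intro q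
          rw [hv q]
          constructor
          · rintro (hq | ⟨t, ht1, ht2, rfl⟩)
            · obtain ⟨s, hs, hb⟩ := (hiff q).1 hq
              exact ⟨s, List.mem_append_left _ hs, hb⟩
            · refine ⟨((x, y), (x + m.2 * p.1, y + m.2 * p.2)),
                List.mem_append_right _ (List.mem_singleton_self _), ?_⟩
              exact (inBox_seg hu x y m.2 hn _).2 ⟨t, by omega, by omega, rfl⟩
          · rintro ⟨s, hs, hb⟩
            rcases List.mem_append.1 hs with hs' | hs'
            · exact Or.inl ((hiff q).2 ⟨s, hs', hb⟩)
            · rw [List.mem_singleton] at hs'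
              subst hs'
              obtain ⟨t, ht0, ht2, rfl⟩ := (inBox_seg hu x y m.2 hn _).1 hb
              by_cases h0 : t = 0
              · subst h0
                left
                simpa using hxy
              · right
                exact ⟨t, by omega, by omega, rfl⟩
      · rw [if_neg hn]
        push_neg at hn
        have hcast : ((m.2.toNat : Nat) : Int) = 0 := by omega
        have e1 : x + ((m.2.toNat : Nat) : Int) * p.1 = x := by rw [hcast]; ring
        have e2 : y + ((m.2.toNat : Nat) : Int) * p.2 = y := by rw [hcast]; ring
        rw [e1, e2]
        refine ⟨rfl, rfl, rfl, (hv _).2 (Or.inl hxy), ?_⟩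
        intro q
        rw [hv q]
        constructor
        · rintro (hq | ⟨t, ht1, ht2, _⟩)
          · exact (hiff q).1 hq
          · exact absurd ht2 (by omega)
        · exact fun hq => Or.inl ((hiff q).2 hq)
    · -- crossing found: A's inner loop returns at the same first step
      obtain ⟨horig, _, hall⟩ := foldmin_some x y p.1 p.2 m.2 segs none t hbest
      rcases horig with h3 | ⟨s, hs, hfs⟩
      · exact absurd h3 (by simp)
      obtain ⟨ht1, ht2, hbox, hsmin⟩ := firstHit_some hu x y m.2 s.1.1 s.1.2 s.2.1 s.2.2 t hfs
      simp only [Prod.mk.eta] at hbox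
      have hmem : (x + t * p.1, y + t * p.2) ∈ v := (hiff _).2 ⟨s, hs, hbox⟩
      have hglobalmin : ∀ u, 1 ≤ u → u < t → (x + u * p.1, y + u * p.2) ∉ v := by
        intro u h1 h2 hmemu
        obtain ⟨s', hs', hb'⟩ := (hiff _).1 hmemu
        rcases hf' : firstHit x y p.1 p.2 m.2 s'.1.1 s'.1.2 s'.2.1 s'.2.2 with _ | b
        · have hn' := firstHit_none hu x y m.2 s'.1.1 s'.1.2 s'.2.1 s'.2.2 hf' u h1 (by omega)
          simp only [Prod.mk.eta] at hn'
          exact hn' hb'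
        · obtain ⟨hb1, hb2, _, hbmin⟩ := firstHit_some hu x y m.2 s'.1.1 s'.1.2 s'.2.1 s'.2.2 b hf'
          have htb := hall s' hs' b hf'
          by_cases hub : u < b
          · have hn' := hbmin u h1 hub
            simp only [Prod.mk.eta] at hn'
            exact hn' hb'
          · omega
      have hA := innerA_hit hu m.2.toNat x y v t ht1 (by omega) hmem hglobalmin
      rw [hA]
      exact rfl

theorem fold_inv (l : List (String × Int))
    (sa : Sum Int (Int × Int × Int × Std.HashSet (Int × Int)))
    (sb : Sum Int (Int × Int × Int × List ((Int × Int) × (Int × Int))))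
    (h : InvSt sa sb) : InvSt (l.foldl stepA sa) (l.foldl stepB sb) := by
  induction l generalizing sa sb with
  | nil => exact h
  | cons m l ih => exact ih _ _ (step_inv _ _ _ h)

-- ===== VERDICT (by name: the statement is the Claim_ definition above) =====
theorem part2_spec : Claim_equal_part2 := by
  intro inp _
  unfold Spec_part2 part2 part2_alt
  have h0 : InvSt (.inr (0, 0, 0, (∅ : Std.HashSet (Int × Int)).insert (0, 0)))
      (.inr (0, 0, 0, [(((0:Int), (0:Int)), ((0:Int), (0:Int)))])) := by
    refine ⟨rfl, rfl, rfl, by simp, fun p => ?_⟩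
    simp [Std.HashSet.mem_insert, inBox, Prod.ext_iff]
    omega
  have := fold_inv inp _ _ h0
  rcases ha : inp.foldl stepA (.inr (0, 0, 0, (∅ : Std.HashSet (Int × Int)).insert (0, 0))) with a | st
  · rcases hb : inp.foldl stepB (.inr (0, 0, 0, [(((0:Int), (0:Int)), ((0:Int), (0:Int)))])) with b | st'
    · rw [ha, hb] at this; exact this
    · rw [ha, hb] at this; exact absurd this (by simp [InvSt])
  · rcases hb : inp.foldl stepB (.inr (0, 0, 0, [(((0:Int), (0:Int)), ((0:Int), (0:Int)))])) with b | st'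
    · rw [ha, hb] at this; rcases st with ⟨d, x, y, v⟩; exact absurd this (by simp [InvSt])
    · rfl
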